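-- pv_equiv track=rewrite | github.com/zxgsy520/bioscript | merge_bam.py | sort_file
-- ===== SOURCE A (Python) =====
-- def get_sample(file):
--
--     name = file.split('/')[-1]
--
--     if '--' in name:
--         name = name.split('--')[1].split('.bam')[0]
--     else:
--         name = name.split('.')[0]
--
--     return name
--
-- def sort_file(files):
--
--     data = {}
--
--     for file in files:
--         name = get_sample(file)
--
--         if name not in data:
--             data[name] = []
--         data[name].append(file)
--
--     return data
-- ===== SOURCE B (Python) =====
-- def get_sample(file):
--
--     name = file.split('/')[-1]
--
--     if '--' in name:
--         name = name.split('--')[1].split('.bam')[0]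
--     else:
--         name = name.split('.')[0]
--
--     return name
--
--
-- def sort_file(files):
--     # Two-pass grouping: compute all names, take their first-occurrence
--     # dedup as the key order, then collect each group by one filter pass.
--     names = [get_sample(f) for f in files]
--     order = list(dict.fromkeys(names))
--     return {k: [f for f, n in zip(files, names) if n == k] for k in order}
-- ===== Notes on version B (the rewrite author's own statement) =====
-- stated objective: alternative
-- what changed: B replaces A's single-pass dict-append loop by a two-pass scheme: map every file to its sample name, dedup the names for the key order, then build each group with a filter over the precomputed (file, name) pairs.
import Mathlib
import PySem

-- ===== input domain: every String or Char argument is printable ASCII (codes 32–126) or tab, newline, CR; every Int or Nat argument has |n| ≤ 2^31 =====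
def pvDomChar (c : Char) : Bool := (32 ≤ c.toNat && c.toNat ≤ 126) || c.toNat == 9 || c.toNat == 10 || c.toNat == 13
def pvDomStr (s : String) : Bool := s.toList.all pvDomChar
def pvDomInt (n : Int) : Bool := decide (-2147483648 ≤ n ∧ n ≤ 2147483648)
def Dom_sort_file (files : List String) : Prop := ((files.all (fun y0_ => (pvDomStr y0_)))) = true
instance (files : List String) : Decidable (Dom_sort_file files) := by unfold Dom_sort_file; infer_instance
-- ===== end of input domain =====

-- B groups by a dedup-of-names key pass plus one filter per group instead of A's
-- single dict-append loop (objective: alternative decomposition, same results).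

-- ===== PORT A =====
-- shared helper (identical Python code in Source A and Source B);
-- '.split(sep)' always returns a nonempty list, and when '--' is in name the
-- split at '--' has ≥ 2 pieces, so the total pyGetD forms are exact here;
-- the separators are nonempty literals, so 'split?' is always 'some' and '.getD []' is exact.
def get_sample (file : String) : String :=
  let name := PySem.List.pyGetD ((PySem.Str.split? file "/").getD []) (-1) ""
  if PySem.Str.isIn "--" name then
    PySem.List.pyGetD
      ((PySem.Str.split? (PySem.List.pyGetD ((PySem.Str.split? name "--").getD []) 1 "") ".bam").getD []) 0 ""
  else
    PySem.List.pyGetD ((PySem.Str.split? name ".").getD []) 0 ""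

def sort_file (files : List String) : List (String × List String) :=
  (files.foldl
    (fun (d : PySem.Dict String (List String)) file =>
      let name := get_sample file
      let d := if d.contains name then d else d.insert name []
      d.modify name [] (fun l => l ++ [file]))
    PySem.Dict.empty).items

-- ===== PORT B =====
def sort_file_alt (files : List String) : List (String × List String) :=
  let names := files.map get_sample
  let order := PySem.List.dedup names
  order.map (fun k => (k, ((files.zip names).filter (fun p => p.2 == k)).map (fun p => p.1)))

-- ===== PRECONDITION & SPEC =====
def Spec_sort_file (files : List String) (out : List (String × List String)) : Prop := out = sort_file_alt files
instance (files : List String) (out : List (String × List String)) : Decidable (Spec_sort_file files out) := by unfold Spec_sort_file; infer_instance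

-- ===== CLAIM (what is proved, stated in full; the proofs are below) =====
def Claim_equal_sort_file : Prop := ∀ (files : List String), Dom_sort_file files → Spec_sort_file files (sort_file files)

-- ===== LEMMAS AND PROOFS =====

-- A's loop body ('setdefault []' then append) is a single Dict.modify.
theorem sort_file_step (d : PySem.Dict String (List String)) (file : String) :
    (let name := get_sample file
     let d := if d.contains name then d else d.insert name []
     d.modify name [] (fun l => l ++ [file]))
      = d.modify (get_sample file) [] (fun l => l ++ [file]) := by
  set name := get_sample file with hn
  by_cases h : d.contains name
  · simp [h]
  · simp only [h, if_false]
    simp [PySem.Dict.modify, PySem.Dict.getD_insert_self,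
      PySem.Dict.insert_insert_self, PySem.Dict.getD_of_not_contains d [] (by simpa using h)]

theorem sort_file_eq_alt (files : List String) :
    sort_file files = sort_file_alt files := by
  unfold sort_file sort_file_alt
  simp only [sort_file_step]
  have hfold :
      files.foldl (fun (d : PySem.Dict String (List String)) file =>
          d.modify (get_sample file) [] (fun l => l ++ [file])) PySem.Dict.empty
        = (files.map (fun f => (get_sample f, f))).foldl
            (fun d p => d.modify p.1 [] (fun l => l ++ [p.2])) PySem.Dict.empty := by
    rw [List.foldl_map]
  rw [hfold]
  set D := (files.map (fun f => (get_sample f, f))).foldl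
      (fun (d : PySem.Dict String (List String)) p => d.modify p.1 [] (fun l => l ++ [p.2]))
      PySem.Dict.empty with hD
  have hnodup : D.keys.Nodup := by
    rw [hD]
    exact PySem.Dict.nodup_keys_foldl_modify_key _ _ _ _ _ PySem.Dict.nodup_keys_empty
  have hkeys : D.keys = PySem.List.dedup (files.map get_sample) := by
    rw [hD, PySem.Dict.keys_foldl_modify_key]
    simp [PySem.Dict.keys_empty, PySem.Set.update_nil_left, List.map_map, Function.comp_def]
  rw [PySem.Dict.items_eq_map_keys D hnodup [], hkeys]
  apply List.map_congr_left
  intro k _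
  have hval : D.getD k [] = files.filter (fun f => get_sample f == k) := by
    rw [hD, PySem.Dict.getD_foldl_modify_append]
    simp [PySem.Dict.getD_empty, List.filter_map, Function.comp_def, List.map_map]
  have hzip : files.zip (files.map get_sample) = files.map (fun f => (f, get_sample f)) := by
    simpa using (List.zip_map' (f := id) (g := get_sample) (l := files))
  rw [hval, hzip]
  simp [List.filter_map, Function.comp_def, List.map_map]

-- ===== VERDICT (by name: the statement is the Claim_ definition above) =====
theorem sort_file_spec : Claim_equal_sort_file := by
  intro files _
  unfold Spec_sort_file
  exact sort_file_eq_alt files
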